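-- pv_equiv track=rewrite | github.com/charlesrw1/MultiplayerFps | Scripts/gen_filters.py | generate_filters_xml
-- ===== SOURCE A (Python) =====
-- def generate_filters_xml(filters: dict, annotated: list) -> str:
--     lines = ['<?xml version="1.0" encoding="utf-8"?>',
--              '<Project ToolsVersion="4.0" xmlns="http://schemas.microsoft.com/developer/msbuild/2003">']
--
--     # --- Filter definitions ---
--     if filters:
--         lines.append("  <ItemGroup>")
--         for fpath, fid in filters.items():
--             lines.append(f'    <Filter Include="{fpath}">')
--             lines.append(f"      <UniqueIdentifier>{fid}</UniqueIdentifier>")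
--             lines.append("    </Filter>")
--         lines.append("  </ItemGroup>")
--
--     # --- File entries grouped by tag ---
--     tag_order = ["ClCompile", "ClInclude", "None", "Text", "Natvis"]
--     by_tag: dict[str, list] = {t: [] for t in tag_order}
--
--     for tag, inc, fpath in annotated:
--         if tag not in by_tag:
--             by_tag[tag] = []
--         by_tag[tag].append((inc, fpath))
--
--     for tag in tag_order:
--         entries = by_tag.get(tag, [])
--         if not entries:
--             continue
--         lines.append("  <ItemGroup>")
--         for inc, fpath in entries:
--             if fpath:
--                 lines.append(f'    <{tag} Include="{inc}">')
--                 lines.append(f"      <Filter>{fpath}</Filter>")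
--                 lines.append(f"    </{tag}>")
--             else:
--                 lines.append(f'    <{tag} Include="{inc}" />')
--         lines.append("  </ItemGroup>")
--
--     lines.append("</Project>")
--     return "\n".join(lines) + "\n"
-- ===== SOURCE B (Python) =====
-- def generate_filters_xml(filters: dict, annotated: list) -> str:
--     def file_lines(tag, inc, fpath):
--         if fpath:
--             return [f'    <{tag} Include="{inc}">',
--                     f"      <Filter>{fpath}</Filter>",
--                     f"    </{tag}>"]
--         return [f'    <{tag} Include="{inc}" />']
--
--     head = ['<?xml version="1.0" encoding="utf-8"?>',
--             '<Project ToolsVersion="4.0" xmlns="http://schemas.microsoft.com/developer/msbuild/2003">']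
--
--     filter_block = [] if not filters else (
--         ["  <ItemGroup>"]
--         + [line for fpath, fid in filters.items()
--            for line in (f'    <Filter Include="{fpath}">',
--                         f"      <UniqueIdentifier>{fid}</UniqueIdentifier>",
--                         "    </Filter>")]
--         + ["  </ItemGroup>"])
--
--     groups = []
--     for tag in ("ClCompile", "ClInclude", "None", "Text", "Natvis"):
--         body = [line for t, inc, fpath in annotated if t == tag
--                 for line in file_lines(tag, inc, fpath)]
--         if body:
--             groups += ["  <ItemGroup>"] + body + ["  </ItemGroup>"]
--
--     return "\n".join(head + filter_block + groups + ["</Project>"]) + "\n"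
-- ===== Notes on version B (the rewrite author's own statement) =====
-- stated objective: simpler
-- what changed: Removed the by_tag dict index and the mutable lines list: B builds each tag's group by a per-tag filtering comprehension over annotated and assembles the document from pure list sections (head + filter_block + groups) joined once.
import Mathlib
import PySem

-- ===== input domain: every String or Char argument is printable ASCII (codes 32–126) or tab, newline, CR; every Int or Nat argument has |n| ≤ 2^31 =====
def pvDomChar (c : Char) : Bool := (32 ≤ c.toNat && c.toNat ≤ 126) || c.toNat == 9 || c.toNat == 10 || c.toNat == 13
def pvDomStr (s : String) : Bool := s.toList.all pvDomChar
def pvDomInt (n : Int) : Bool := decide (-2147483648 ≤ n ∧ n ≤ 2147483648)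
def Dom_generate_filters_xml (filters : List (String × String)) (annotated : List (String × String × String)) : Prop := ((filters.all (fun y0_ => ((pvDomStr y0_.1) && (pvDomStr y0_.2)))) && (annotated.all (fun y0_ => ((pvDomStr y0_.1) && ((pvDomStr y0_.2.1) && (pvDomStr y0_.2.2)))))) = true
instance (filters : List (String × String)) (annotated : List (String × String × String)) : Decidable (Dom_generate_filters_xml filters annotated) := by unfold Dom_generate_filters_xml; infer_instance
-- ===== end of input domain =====

-- B removes A's by_tag dict index and mutable line list: each tag group is built by a
-- per-tag filtering comprehension over annotated, and the document is assembled from pure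
-- list sections; same output, simpler decomposition (objective: simpler, not faster).

-- ===== PORT A =====
def generate_filters_xml (filters : List (String × String)) (annotated : List (String × String × String)) : String :=
  let lines : List String :=
    ["<?xml version=\"1.0\" encoding=\"utf-8\"?>",
     "<Project ToolsVersion=\"4.0\" xmlns=\"http://schemas.microsoft.com/developer/msbuild/2003\">"]
  -- Filter definitions
  let lines := if filters.isEmpty then lines else
    (filters.foldl (fun acc p =>
        acc ++ ["    <Filter Include=\"" ++ p.1 ++ "\">",
                "      <UniqueIdentifier>" ++ p.2 ++ "</UniqueIdentifier>",
                "    </Filter>"]) (lines ++ ["  <ItemGroup>"])) ++ ["  </ItemGroup>"]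
  -- File entries grouped by tag
  let tag_order : List String := ["ClCompile", "ClInclude", "None", "Text", "Natvis"]
  let by_tag : PySem.Dict String (List (String × String)) :=
    tag_order.foldl (fun d t => d.insert t []) PySem.Dict.empty
  let by_tag := annotated.foldl (fun d a =>
      (if d.contains a.1 then d else d.insert a.1 []).modify a.1 []
        (fun v => v ++ [(a.2.1, a.2.2)])) by_tag
  let lines := tag_order.foldl (fun ls tag =>
      let entries := by_tag.getD tag []
      if entries.isEmpty then ls
      else (entries.foldl (fun acc e =>
              if e.2 ≠ "" then
                acc ++ ["    <" ++ tag ++ " Include=\"" ++ e.1 ++ "\">",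
                        "      <Filter>" ++ e.2 ++ "</Filter>",
                        "    </" ++ tag ++ ">"]
              else
                acc ++ ["    <" ++ tag ++ " Include=\"" ++ e.1 ++ "\" />"])
            (ls ++ ["  <ItemGroup>"])) ++ ["  </ItemGroup>"]) lines
  PySem.Str.join "\n" (lines ++ ["</Project>"]) ++ "\n"

-- ===== PORT B =====
def fileLines (tag inc fpath : String) : List String :=
  if fpath ≠ "" then
    ["    <" ++ tag ++ " Include=\"" ++ inc ++ "\">",
     "      <Filter>" ++ fpath ++ "</Filter>",
     "    </" ++ tag ++ ">"]
  else
    ["    <" ++ tag ++ " Include=\"" ++ inc ++ "\" />"]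

def generate_filters_xml_alt (filters : List (String × String)) (annotated : List (String × String × String)) : String :=
  let head : List String :=
    ["<?xml version=\"1.0\" encoding=\"utf-8\"?>",
     "<Project ToolsVersion=\"4.0\" xmlns=\"http://schemas.microsoft.com/developer/msbuild/2003\">"]
  let filter_block : List String := if filters.isEmpty then [] else
    ["  <ItemGroup>"] ++
    (filters.flatMap (fun p =>
        ["    <Filter Include=\"" ++ p.1 ++ "\">",
         "      <UniqueIdentifier>" ++ p.2 ++ "</UniqueIdentifier>",
         "    </Filter>"])) ++ ["  </ItemGroup>"]
  let groups : List String :=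
    (["ClCompile", "ClInclude", "None", "Text", "Natvis"] : List String).foldl (fun g tag =>
      let body := (annotated.filter (fun a => a.1 == tag)).flatMap
                    (fun a => fileLines tag a.2.1 a.2.2)
      if body.isEmpty then g
      else g ++ ["  <ItemGroup>"] ++ body ++ ["  </ItemGroup>"]) []
  PySem.Str.join "\n" (head ++ filter_block ++ groups ++ ["</Project>"]) ++ "\n"

-- ===== PRECONDITION & SPEC =====
def Spec_generate_filters_xml (filters : List (String × String)) (annotated : List (String × String × String)) (out : String) : Prop := out = generate_filters_xml_alt filters annotated
instance (filters : List (String × String)) (annotated : List (String × String × String)) (out : String) : Decidable (Spec_generate_filters_xml filters annotated out) := by unfold Spec_generate_filters_xml; infer_instance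

-- ===== CLAIM (what is proved, stated in full; the proofs are below) =====
def Claim_equal_generate_filters_xml : Prop := ∀ (filters : List (String × String)) (annotated : List (String × String × String)), Dom_generate_filters_xml filters annotated → Spec_generate_filters_xml filters annotated (generate_filters_xml filters annotated)

-- ===== LEMMAS AND PROOFS =====

-- the contribution of one tag group to the output, shared shape of both ports
def pvGroup (annotated : List (String × String × String)) (tag : String) : List String :=
  let body := (annotated.filter (fun a => a.1 == tag)).flatMap (fun a => fileLines tag a.2.1 a.2.2)
  if body.isEmpty then [] else ["  <ItemGroup>"] ++ body ++ ["  </ItemGroup>"]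

-- one step of A's grouping loop, expressed on getD
theorem pv_getD_group_step (d : PySem.Dict String (List (String × String)))
    (a : String × String × String) (c : String) :
    (((if d.contains a.1 then d else d.insert a.1 []).modify a.1 []
        (fun v => v ++ [(a.2.1, a.2.2)]))).getD c []
      = d.getD c [] ++ (if a.1 == c then [(a.2.1, a.2.2)] else []) := by
  have hkeep : (if d.contains a.1 then d else d.insert a.1 []).getD a.1 [] = d.getD a.1 [] := by
    split
    · rfl
    · next h =>
      rw [PySem.Dict.getD_insert]
      rw [PySem.Dict.getD_eq_get?_getD,
        (PySem.Dict.get?_eq_none_iff_contains d a.1).mpr (by simpa using h)]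
      simp
  by_cases hc : c = a.1
  · subst hc
    rw [PySem.Dict.getD_modify_self, hkeep]
    simp
  · rw [PySem.Dict.getD_modify_of_ne _ _ _ hc]
    have : (a.1 == c) = false := beq_eq_false_iff_ne.mpr (fun h => hc h.symm)
    rw [this]
    simp only [Bool.false_eq_true, if_false, List.append_nil]
    split
    · rfl
    · rw [PySem.Dict.getD_insert, if_neg hc]

-- A's grouping loop computes, per key, exactly the per-tag filter of annotated
theorem pv_getD_group_loop (l : List (String × String × String))
    (d : PySem.Dict String (List (String × String))) (c : String) :
    (l.foldl (fun d a =>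
        (if d.contains a.1 then d else d.insert a.1 []).modify a.1 []
          (fun v => v ++ [(a.2.1, a.2.2)])) d).getD c []
      = d.getD c [] ++ (l.filter (fun a => a.1 == c)).map (fun a => (a.2.1, a.2.2)) := by
  induction l generalizing d with
  | nil => simp
  | cons a l ih =>
    simp only [List.foldl_cons, List.filter_cons, ih, pv_getD_group_step]
    by_cases h : (a.1 == c) = true
    · simp [h]
    · simp [h]

-- the initial dict maps every key to []
theorem pv_getD_init (c : String) :
    ((["ClCompile", "ClInclude", "None", "Text", "Natvis"] : List String).foldl
        (fun d t => d.insert t []) (PySem.Dict.empty : PySem.Dict String (List (String × String)))).getD c []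
      = [] := by
  simp only [List.foldl_cons, List.foldl_nil, PySem.Dict.getD_insert]
  split_ifs <;> simp [PySem.Dict.getD_empty]

-- a flatMap of fileLines is empty exactly when its source list is
theorem pv_body_isEmpty (tag : String) (l : List (String × String × String)) :
    (l.flatMap (fun a => fileLines tag a.2.1 a.2.2)).isEmpty = l.isEmpty := by
  cases l with
  | nil => rfl
  | cons a l =>
    simp only [List.flatMap_cons, fileLines]
    split <;> simp

-- the big by_tag expression of port A, named for the proofs
def pvByTag (annotated : List (String × String × String)) : PySem.Dict String (List (String × String)) :=
  annotated.foldl (fun d a =>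
      (if d.contains a.1 then d else d.insert a.1 []).modify a.1 []
        (fun v => v ++ [(a.2.1, a.2.2)]))
    ((["ClCompile", "ClInclude", "None", "Text", "Natvis"] : List String).foldl
      (fun d t => d.insert t []) PySem.Dict.empty)

theorem pv_byTag_getD (annotated : List (String × String × String)) (c : String) :
    (pvByTag annotated).getD c []
      = (annotated.filter (fun a => a.1 == c)).map (fun a => (a.2.1, a.2.2)) := by
  unfold pvByTag
  rw [pv_getD_group_loop, pv_getD_init]
  rfl

-- A's emission step for one tag appends exactly pvGroup
theorem pv_stepA (annotated : List (String × String × String)) (ls : List String) (tag : String) :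
    (if ((pvByTag annotated).getD tag []).isEmpty then ls
     else (((pvByTag annotated).getD tag []).foldl (fun acc e =>
            if e.2 ≠ "" then
              acc ++ ["    <" ++ tag ++ " Include=\"" ++ e.1 ++ "\">",
                      "      <Filter>" ++ e.2 ++ "</Filter>",
                      "    </" ++ tag ++ ">"]
            else
              acc ++ ["    <" ++ tag ++ " Include=\"" ++ e.1 ++ "\" />"])
          (ls ++ ["  <ItemGroup>"])) ++ ["  </ItemGroup>"])
      = ls ++ pvGroup annotated tag := by
  rw [pv_byTag_getD]
  simp only [pvGroup]
  have hstep : (fun (acc : List String) (e : String × String) =>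
      if e.2 ≠ "" then
        acc ++ ["    <" ++ tag ++ " Include=\"" ++ e.1 ++ "\">",
                "      <Filter>" ++ e.2 ++ "</Filter>",
                "    </" ++ tag ++ ">"]
      else
        acc ++ ["    <" ++ tag ++ " Include=\"" ++ e.1 ++ "\" />"])
      = fun acc e => acc ++ fileLines tag e.1 e.2 := by
    funext acc e
    simp only [fileLines]
    split <;> rfl
  rw [hstep, PySem.List.foldl_append_eq_flatMap, List.flatMap_map]
  have hempty :
      (((annotated.filter (fun a => a.1 == tag)).map (fun a => (a.2.1, a.2.2))).isEmpty)
        = ((annotated.filter (fun a => a.1 == tag)).flatMap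
            (fun a => fileLines tag a.2.1 a.2.2)).isEmpty := by
    rw [pv_body_isEmpty]
    simp
  by_cases hb : ((annotated.filter (fun a => a.1 == tag)).flatMap
      (fun a => fileLines tag a.2.1 a.2.2)).isEmpty
  · rw [hempty, if_pos hb, if_pos hb]
    simp
  · rw [hempty, if_neg hb, if_neg hb]
    simp [List.append_assoc]

-- A's emission loop, as a flatMap of pvGroup
theorem pv_foldA (annotated : List (String × String × String)) (ts : List String) (ls : List String) :
    ts.foldl (fun ls tag =>
      if ((pvByTag annotated).getD tag []).isEmpty then ls
      else (((pvByTag annotated).getD tag []).foldl (fun acc e =>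
              if e.2 ≠ "" then
                acc ++ ["    <" ++ tag ++ " Include=\"" ++ e.1 ++ "\">",
                        "      <Filter>" ++ e.2 ++ "</Filter>",
                        "    </" ++ tag ++ ">"]
              else
                acc ++ ["    <" ++ tag ++ " Include=\"" ++ e.1 ++ "\" />"])
            (ls ++ ["  <ItemGroup>"])) ++ ["  </ItemGroup>"]) ls
      = ls ++ ts.flatMap (pvGroup annotated) := by
  induction ts generalizing ls with
  | nil => simp
  | cons t ts ih =>
    rw [List.foldl_cons, pv_stepA, ih, List.flatMap_cons, List.append_assoc]

-- B's group loop, as the same flatMap of pvGroup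
theorem pv_foldB (annotated : List (String × String × String)) (ts : List String) (g : List String) :
    ts.foldl (fun g tag =>
      if ((annotated.filter (fun a => a.1 == tag)).flatMap
            (fun a => fileLines tag a.2.1 a.2.2)).isEmpty then g
      else g ++ ["  <ItemGroup>"] ++
           ((annotated.filter (fun a => a.1 == tag)).flatMap
             (fun a => fileLines tag a.2.1 a.2.2)) ++ ["  </ItemGroup>"]) g
      = g ++ ts.flatMap (pvGroup annotated) := by
  induction ts generalizing g with
  | nil => simp
  | cons t ts ih =>
    rw [List.foldl_cons, ih, List.flatMap_cons]
    simp only [pvGroup]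
    split
    · simp
    · simp [List.append_assoc]

-- ===== VERDICT (by name: the statement is the Claim_ definition above) =====
theorem generate_filters_xml_spec : Claim_equal_generate_filters_xml := by
  intro filters annotated _
  show generate_filters_xml filters annotated = generate_filters_xml_alt filters annotated
  unfold generate_filters_xml generate_filters_xml_alt
  simp only []
  rw [show (annotated.foldl (fun d a =>
        (if d.contains a.1 then d else d.insert a.1 []).modify a.1 []
          (fun v => v ++ [(a.2.1, a.2.2)]))
      ((["ClCompile", "ClInclude", "None", "Text", "Natvis"] : List String).foldl
        (fun d t => d.insert t []) PySem.Dict.empty)) = pvByTag annotated from rfl]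
  rw [pv_foldA annotated, pv_foldB annotated]
  by_cases hf : filters.isEmpty
  · rw [if_pos hf, if_pos hf]
    simp
  · rw [if_neg hf, if_neg hf]
    rw [PySem.List.foldl_append_eq_flatMap]
    simp [List.append_assoc]
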